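-- pv_equiv track=rewrite | github.com/Kukuksumusu/advent_of_code_2025 | src/day11/task2.py | simplify_connections
-- ===== SOURCE A (Python) =====
-- def simplify_connections(connections: dict[str, list[str]]) -> dict[str, list[str]]:
--     """Remove nodes with single outgoing edges (except special nodes) by bypassing them.
--
--     This optimization reduces graph size while preserving path counts, since:
--     - A node with 1 output acts as a simple passthrough
--     - All paths through it can be counted by directly connecting its inputs to its output
--
--     Note: Special nodes (svr, out, dac, fft) are never removed as they're required
--     for the path decomposition logic.
--     """
--     to_del = []
--     for k in connections:
--         if len(connections[k]) == 1 and k not in ("svr", "out", "dac", "fft"):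
--             to_del.append(k)
--             for x in connections:
--                 connections[x] = [y if y != k else connections[k][0] for y in connections[x]]
--     for k in to_del:
--         del connections[k]
--     return connections
-- ===== SOURCE B (Python) =====
-- def simplify_connections(connections: dict[str, list[str]]) -> dict[str, list[str]]:
--     """Bypass single-out-edge nodes (except svr/out/dac/fft) via a substitution map.
--
--     Instead of rewriting every adjacency list once per removed node, maintain a
--     dict `repl` mapping each removed node to its current bypass target, then
--     rewrite all adjacency lists once at the end (an alternative mechanism, same result).  Mutates `connections` in place
--     and returns it, like the original.
--     """
--     special = ("svr", "out", "dac", "fft")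
--     repl = {}
--     removed = []
--     for k, v in connections.items():
--         if len(v) == 1 and k not in special:
--             t = repl.get(v[0], v[0])
--             repl = {j: (t if w == k else w) for j, w in repl.items()}
--             repl[k] = t
--             removed.append(k)
--     removed = set(removed)
--     result = {k: [repl.get(y, y) for y in v]
--               for k, v in connections.items() if k not in removed}
--     connections.clear()
--     connections.update(result)
--     return connections
-- ===== Notes on version B (the rewrite author's own statement) =====
-- stated objective: alternative
-- what changed: Instead of rewriting every adjacency list once per removed node, B folds once over the dict maintaining a substitution dict (removed node -> current bypass target) and rewrites all adjacency lists in a single final pass; Pre_ only excludes association lists with duplicate keys, which represent no Python dict (the parameter is dict[str, list[str]]), so no input A accepts is excluded.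
import Mathlib
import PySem

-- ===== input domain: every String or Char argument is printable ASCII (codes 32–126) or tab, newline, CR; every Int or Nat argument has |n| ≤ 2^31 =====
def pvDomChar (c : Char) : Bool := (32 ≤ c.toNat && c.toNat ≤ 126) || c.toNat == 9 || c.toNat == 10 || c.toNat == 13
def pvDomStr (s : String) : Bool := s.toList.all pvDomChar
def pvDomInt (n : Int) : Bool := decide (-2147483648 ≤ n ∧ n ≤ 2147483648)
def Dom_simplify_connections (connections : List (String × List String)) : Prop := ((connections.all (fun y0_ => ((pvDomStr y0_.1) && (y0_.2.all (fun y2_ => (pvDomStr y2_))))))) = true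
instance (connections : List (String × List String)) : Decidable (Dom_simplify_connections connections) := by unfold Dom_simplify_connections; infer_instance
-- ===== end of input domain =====

-- B replaces A's per-removal rewrite of every adjacency list by a substitution map applied once at
-- the end (objective: alternative — a different mechanism, not measured faster). Both Pythons mutate
-- the argument dict in place and return it; B ends in the same final state, and the theorems below
-- are about the returned value.

-- ===== PORT A =====
-- `for x in connections: connections[x] = [y if y != k else tgt for y in connections[x]]`
-- rewrites the value of every entry in place, in order: over the items list this is exactly this map.
def scRewrite (c : List (String × List String)) (k tgt : String) : List (String × List String) :=
  c.map (fun p => (p.1, p.2.map (fun y => if y = k then tgt else y)))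

def scStepA (st : List String × List (String × List String)) (k : String) :
    List String × List (String × List String) :=
  match (PySem.Dict.mk st.2).get? k with
  | none => st        -- unreachable: k stays a key of the dict throughout the loop
  | some vk =>
    if vk.length = 1 ∧ k ∉ (["svr", "out", "dac", "fft"] : List String) then
      -- vk.headI = connections[k][0]; the guard gives vk.length = 1, and connections[k][0] is
      -- unchanged by the inner rewrites (a singleton [t] with t ≠ k is left alone, [k] stays [k])
      (st.1 ++ [k], scRewrite st.2 k vk.headI)
    else st

def simplify_connections (connections : List (String × List String)) : List (String × List String) :=
  -- `for k in connections`: values are mutated during the loop but the key list never changes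
  let st := (connections.map Prod.fst).foldl scStepA ([], connections)
  -- `for k in to_del: del connections[k]` (k is always present, so `del` never raises under Pre_)
  st.1.foldl (fun c k => (PySem.Dict.erase (PySem.Dict.mk c) k).items) st.2

-- ===== PORT B =====
def scStepB (st : PySem.Dict String String × List String) (kv : String × List String) :
    PySem.Dict String String × List String :=
  if kv.2.length = 1 ∧ kv.1 ∉ (["svr", "out", "dac", "fft"] : List String) then
    let t := st.1.getD kv.2.headI kv.2.headI     -- repl.get(v[0], v[0]); kv.2.headI = v[0], length 1
    let repl' := PySem.Dict.mk (st.1.items.map (fun p => (p.1, if p.2 = kv.1 then t else p.2)))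
    (repl'.insert kv.1 t, st.2 ++ [kv.1])
  else st

def simplify_connections_alt (connections : List (String × List String)) : List (String × List String) :=
  let st := connections.foldl scStepB (PySem.Dict.empty, [])
  let removed := PySem.Set.ofList st.2
  connections.filterMap (fun p =>
    if p.1 ∈ removed then none else some (p.1, p.2.map (fun y => st.1.getD y y)))

-- ===== PRECONDITION & SPEC =====
-- Pre_ excludes association lists with duplicate keys: they represent no Python dict (the Python
-- parameter is dict[str, list[str]], whose keys are unique), so no input A accepts is excluded.
def Pre_simplify_connections (connections : List (String × List String)) : Prop :=
  (connections.map Prod.fst).Nodup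

instance (connections : List (String × List String)) : Decidable (Pre_simplify_connections connections) := by
  unfold Pre_simplify_connections; infer_instance

def pvWitness_simplify_connections : (List (String × List String)) :=
  [("a", ["b"]), ("b", ["c", "d"]), ("svr", ["a"]), ("c", ["c"])]

def Spec_simplify_connections (connections : List (String × List String)) (out : List (String × List String)) : Prop := out = simplify_connections_alt connections
instance (connections : List (String × List String)) (out : List (String × List String)) : Decidable (Spec_simplify_connections connections out) := by unfold Spec_simplify_connections; infer_instance

-- ===== CLAIM (what is proved, stated in full; the proofs are below) =====
def Claim_equal_simplify_connections : Prop := ∀ (connections : List (String × List String)), Dom_simplify_connections connections → Pre_simplify_connections connections → Spec_simplify_connections connections (simplify_connections connections)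

-- ===== LEMMAS AND PROOFS =====

-- first-match lookup commutes with a value-only map of the items list
theorem sc_get?_mk_map {ν ν' : Type} (l : List (String × ν)) (g : ν → ν') (k : String) :
    (PySem.Dict.mk (l.map (fun p => (p.1, g p.2)))).get? k = ((PySem.Dict.mk l).get? k).map g := by
  induction l with
  | nil => rfl
  | cons p t ih =>
      simp only [List.map_cons]
      rw [PySem.Dict.get?_mk_cons, PySem.Dict.get?_mk_cons]
      by_cases h : (p.1 == k) = true
      · simp [h]
      · simp [h, ih]

-- one step of B's substitution map equals post-composing the old map with A's one-node rewrite
theorem sc_rep_step (repl : PySem.Dict String String) (k t : String)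
    (hk : repl.get? k = none) (y : String) :
    ((PySem.Dict.mk (repl.items.map (fun p => (p.1, if p.2 = k then t else p.2)))).insert k t).getD y y
      = if repl.getD y y = k then t else repl.getD y y := by
  by_cases hy : y = k
  · subst hy
    rw [PySem.Dict.getD_insert_self, PySem.Dict.getD_of_get?_eq_none repl _ hk]
    simp
  · rw [PySem.Dict.getD_insert_of_ne _ _ _ hy, PySem.Dict.getD_eq_get?_getD,
        sc_get?_mk_map repl.items (fun w => if w = k then t else w) y]
    cases hgy : (PySem.Dict.mk repl.items).get? y with
    | none =>
        have : repl.getD y y = y := PySem.Dict.getD_of_get?_eq_none _ _ hgy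
        simp [this, hy]
    | some w =>
        have : repl.getD y y = w := PySem.Dict.getD_of_get?_eq_some _ _ hgy
        simp [this]

-- the deletion loop is a single filter
theorem sc_erase_foldl (td : List String) :
    ∀ (c : List (String × List String)),
      td.foldl (fun c k => (PySem.Dict.erase (PySem.Dict.mk c) k).items) c
        = c.filter (fun p => decide (p.1 ∉ td)) := by
  induction td with
  | nil => intro c; simp
  | cons k t ih =>
      intro c
      rw [List.foldl_cons, ih]
      show ((PySem.Dict.erase (PySem.Dict.mk c) k).items).filter _ = _
      simp only [PySem.Dict.erase, List.filter_filter]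
      apply List.filter_congr
      intro p _
      by_cases h1 : p.1 = k <;> simp [h1]

-- filtering a value-mapped list vs B's filterMap over the original list
theorem sc_filterMap (l : List (String × List String)) (g : List String → List String)
    (td : List String) :
    (l.map (fun p => (p.1, g p.2))).filter (fun p => decide (p.1 ∉ td))
      = l.filterMap (fun p =>
          if p.1 ∈ PySem.Set.ofList td then none else some (p.1, g p.2)) := by
  induction l with
  | nil => rfl
  | cons p t ih =>
      simp only [decide_not] at ih ⊢
      simp only [List.map_cons, List.filter_cons, List.filterMap_cons]
      by_cases h : p.1 ∈ td
      · simp [h, PySem.Set.mem_ofList, ih]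
      · simp [h, PySem.Set.mem_ofList, ih]

-- the main invariant: A's loop over the remaining keys, started from the value-mapped list,
-- runs in lock-step with B's fold over the remaining entries
theorem sc_main (suf : List (String × List String)) :
    ∀ (pre : List (String × List String)) (repl : PySem.Dict String String)
      (removed : List String),
      (((pre ++ suf).map Prod.fst).Nodup) →
      (∀ j ∈ suf.map Prod.fst, repl.get? j = none) →
      (suf.map Prod.fst).foldl scStepA
          (removed, (pre ++ suf).map (fun p => (p.1, p.2.map (fun y => repl.getD y y))))
        = ((suf.foldl scStepB (repl, removed)).2,
           (pre ++ suf).map (fun p =>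
             (p.1, p.2.map (fun y => (suf.foldl scStepB (repl, removed)).1.getD y y)))) := by
  induction suf with
  | nil => intro pre repl removed _ _; rfl
  | cons kv tail ih =>
      intro pre repl removed hnd hrepl
      obtain ⟨k, v⟩ := kv
      have hrk : repl.get? k = none := hrepl k (by simp)
      have hmem : (k, v) ∈ pre ++ (k, v) :: tail := by simp
      have hget : (PySem.Dict.mk (pre ++ (k, v) :: tail)).get? k = some v :=
        PySem.Dict.get?_of_mem_items _ hmem (by simpa [PySem.Dict.keys] using hnd)
      have hgetm : (PySem.Dict.mk ((pre ++ (k, v) :: tail).map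
          (fun p => (p.1, p.2.map (fun y => repl.getD y y))))).get? k
          = some (v.map (fun y => repl.getD y y)) := by
        rw [sc_get?_mk_map, hget]; rfl
      have hassoc : pre ++ (k, v) :: tail = (pre ++ [(k, v)]) ++ tail := by simp
      have key : ((k, v) :: tail).map Prod.fst = k :: tail.map Prod.fst := rfl
      by_cases hguard : v.length = 1 ∧ k ∉ (["svr", "out", "dac", "fft"] : List String)
      · -- removable node
        obtain ⟨y0, hy0⟩ := List.length_eq_one_iff.mp hguard.1
        subst hy0
        set t := repl.getD y0 y0 with ht
        set repl' := (PySem.Dict.mk (repl.items.map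
            (fun p => (p.1, if p.2 = k then t else p.2)))).insert k t with hrepl'
        have hstepA : scStepA (removed, (pre ++ (k, [y0]) :: tail).map
            (fun p => (p.1, p.2.map (fun y => repl.getD y y)))) k
            = (removed ++ [k], scRewrite ((pre ++ (k, [y0]) :: tail).map
                (fun p => (p.1, p.2.map (fun y => repl.getD y y)))) k t) := by
          simp only [scStepA, hgetm]
          simp [hguard.2, ht]
        have hstepB : ((k, [y0]) :: tail).foldl scStepB (repl, removed)
            = tail.foldl scStepB (repl', removed ++ [k]) := by
          rw [List.foldl_cons]
          simp only [scStepB]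
          simp [hguard.2, ht, hrepl']
        have hrw : scRewrite ((pre ++ (k, [y0]) :: tail).map
              (fun p => (p.1, p.2.map (fun y => repl.getD y y)))) k t
            = (pre ++ (k, [y0]) :: tail).map
                (fun p => (p.1, p.2.map (fun y => repl'.getD y y))) := by
          simp only [scRewrite, List.map_map]
          apply List.map_congr_left
          intro p _
          simp only [Function.comp, List.map_map]
          refine congrArg (Prod.mk p.1) ?_
          apply List.map_congr_left
          intro y _
          simp only [Function.comp]
          rw [hrepl', sc_rep_step repl k t hrk y]
        have hrepl'none : ∀ j ∈ tail.map Prod.fst, repl'.get? j = none := by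
          intro j hj
          have hkt : k ∉ tail.map Prod.fst := by
            have hs : List.Sublist (k :: tail.map Prod.fst)
                ((pre ++ (k, [y0]) :: tail).map Prod.fst) := by
              rw [List.map_append]
              exact List.sublist_append_right _ _
            exact (List.nodup_cons.mp (hnd.sublist hs)).1
          have hjk : j ≠ k := fun h => hkt (h ▸ hj)
          rw [hrepl', PySem.Dict.get?_insert_of_ne _ _ hjk,
              sc_get?_mk_map repl.items (fun w => if w = k then t else w) j,
              hrepl j (by simp [hj])]
          rfl
        rw [key, List.foldl_cons, hstepA, hrw, hstepB, hassoc]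
        exact ih (pre ++ [(k, [y0])]) repl' (removed ++ [k]) (by rw [← hassoc]; exact hnd)
          hrepl'none
      · -- node kept: both states unchanged
        have hstepA : scStepA (removed, (pre ++ (k, v) :: tail).map
            (fun p => (p.1, p.2.map (fun y => repl.getD y y)))) k
            = (removed, (pre ++ (k, v) :: tail).map
                (fun p => (p.1, p.2.map (fun y => repl.getD y y)))) := by
          have hng : ¬((v.map (fun y => repl.getD y y)).length = 1
              ∧ k ∉ (["svr", "out", "dac", "fft"] : List String)) := by
            intro hc; exact hguard ⟨by simpa using hc.1, hc.2⟩
          simp only [scStepA, hgetm]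
          rw [if_neg hng]
        have hstepB : ((k, v) :: tail).foldl scStepB (repl, removed)
            = tail.foldl scStepB (repl, removed) := by
          rw [List.foldl_cons]
          simp only [scStepB]
          rw [if_neg hguard]
        rw [key, List.foldl_cons, hstepA, hstepB, hassoc]
        exact ih (pre ++ [(k, v)]) repl removed (by rw [← hassoc]; exact hnd)
          (fun j hj => hrepl j (by simp [hj]))

-- ===== VERDICT (by name: the statement is the Claim_ definition above) =====
theorem simplify_connections_spec : Claim_equal_simplify_connections := by
  intro connections _ hpre
  unfold Spec_simplify_connections simplify_connections simplify_connections_alt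
  have hstart : connections
      = connections.map (fun p => (p.1, p.2.map (fun y => PySem.Dict.empty.getD y y))) := by
    simp [PySem.Dict.getD_empty]
  have h := sc_main connections [] PySem.Dict.empty [] (by simpa using hpre)
    (fun j _ => PySem.Dict.get?_empty j)
  simp only [List.nil_append] at h
  rw [show (([], connections) : List String × List (String × List String))
        = ([], connections.map (fun p => (p.1, p.2.map (fun y => PySem.Dict.empty.getD y y))))
      from by rw [← hstart], h]
  rw [sc_erase_foldl, sc_filterMap]
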